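-- pv_equiv track=rewrite | github.com/pricoptudor/Numerical_Calculus | Tema4/main.py | has_not_zero_diag
-- ===== SOURCE A (Python) =====
-- def has_not_zero_diag(matrix):
--     for i in range(len(matrix)):
--         ok = False
--         for j in matrix[i]:
--             if j[1] == i:
--                 ok = True
--         if ok == False:
--             return False
--     return True
-- ===== SOURCE B (Python) =====
-- def has_not_zero_diag(matrix):
--     def go(rows, i):
--         if not rows:
--             return True
--         return i in {c for _, c in rows[0]} and go(rows[1:], i + 1)
--     return go(matrix, 0)
-- ===== Notes on version B (the rewrite author's own statement) =====
-- stated objective: alternative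
-- what changed: Replaces the indexed flag-and-short-circuit nested loop by a recursive descent over the list of rows that builds each row's set of column indices once and finishes the row with a single set-membership test.
import Mathlib
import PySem

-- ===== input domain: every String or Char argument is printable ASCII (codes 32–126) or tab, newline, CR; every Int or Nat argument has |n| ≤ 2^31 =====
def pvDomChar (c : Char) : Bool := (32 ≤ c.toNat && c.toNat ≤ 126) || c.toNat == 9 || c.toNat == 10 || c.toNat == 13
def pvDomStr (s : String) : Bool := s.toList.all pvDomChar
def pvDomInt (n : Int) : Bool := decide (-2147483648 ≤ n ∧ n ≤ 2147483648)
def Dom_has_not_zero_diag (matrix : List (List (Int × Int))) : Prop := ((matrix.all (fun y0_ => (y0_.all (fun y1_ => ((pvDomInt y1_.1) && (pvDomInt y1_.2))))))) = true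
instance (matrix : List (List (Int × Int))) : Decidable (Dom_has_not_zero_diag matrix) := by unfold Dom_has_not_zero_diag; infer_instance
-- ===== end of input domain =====

-- B replaces A's indexed flag-and-short-circuit nested loop by a recursive descent over the
-- list of rows, building each row's set of column indices once and testing membership (alternative decomposition).


-- ===== PORT A =====
-- for i in range(len(matrix)): flag scan of matrix[i], early 'return False' on a flagless row
def hnzdLoopA (matrix : List (List (Int × Int))) : List Int → Bool
  | [] => true
  | i :: rest =>
    let ok := ((PySem.List.pyGet? matrix i).getD []).foldl
      (fun ok j => if j.2 == i then true else ok) false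
    if ok == false then false else hnzdLoopA matrix rest

def has_not_zero_diag (matrix : List (List (Int × Int))) : Bool :=
  hnzdLoopA matrix (PySem.List.pyRange 0 matrix.length 1)

-- ===== PORT B =====
-- def go(rows, i): return not rows or (i in {c for _, c in rows[0]} and go(rows[1:], i+1))
def hnzdGo : List (List (Int × Int)) → Int → Bool
  | [], _ => true
  | r :: rest, i =>
    PySem.Set.contains (PySem.Set.ofList (r.map (fun j => j.2))) i && hnzdGo rest (i + 1)

def has_not_zero_diag_alt (matrix : List (List (Int × Int))) : Bool :=
  hnzdGo matrix 0

-- ===== PRECONDITION & SPEC =====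
def Spec_has_not_zero_diag (matrix : List (List (Int × Int))) (out : Bool) : Prop := out = has_not_zero_diag_alt matrix
instance (matrix : List (List (Int × Int))) (out : Bool) : Decidable (Spec_has_not_zero_diag matrix out) := by unfold Spec_has_not_zero_diag; infer_instance

-- ===== CLAIM (what is proved, stated in full; the proofs are below) =====
def Claim_equal_has_not_zero_diag : Prop := ∀ (matrix : List (List (Int × Int))), Dom_has_not_zero_diag matrix → Spec_has_not_zero_diag matrix (has_not_zero_diag matrix)

-- ===== LEMMAS AND PROOFS =====

-- A's flag fold is an 'any'
theorem hnzd_flag_fold (l : List (Int × Int)) (i : Int) (b : Bool) :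
    l.foldl (fun ok j => if j.2 == i then true else ok) b = (b || l.any (fun j => j.2 == i)) := by
  induction l generalizing b with
  | nil => simp
  | cons x xs ih =>
    simp only [List.foldl_cons, List.any_cons, ih]
    by_cases h : x.2 = i
    · simp [h]
    · have hb : (x.2 == i) = false := beq_eq_false_iff_ne.mpr h
      rw [hb]; simp

-- B's set-membership test is the same 'any'
theorem hnzd_contains_eq_any (r : List (Int × Int)) (i : Int) :
    PySem.Set.contains (PySem.Set.ofList (r.map (fun j => j.2))) i
      = r.any (fun j => j.2 == i) := by
  rw [Bool.eq_iff_iff, PySem.Set.contains_iff, PySem.Set.mem_ofList, List.any_eq_true]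
  simp only [List.mem_map, beq_iff_eq]

-- the bridge: A's indexed range loop from position a equals B's descent on the dropped suffix
theorem hnzd_loop_eq_go (full : List (List (Int × Int))) (a : Nat) :
    hnzdLoopA full (PySem.List.pyRange a full.length 1) = hnzdGo (full.drop a) (a : Int) := by
  induction hfuel : full.length - a generalizing a with
  | zero =>
    have hle : full.length ≤ a := by omega
    rw [PySem.List.pyRange_one_eq_nil (by exact_mod_cast hle), List.drop_eq_nil_of_le hle]
    rfl
  | succ n ih =>
    have hlt : a < full.length := by omega
    rw [PySem.List.pyRange_one_cons (by exact_mod_cast hlt),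
        List.drop_eq_getElem_cons hlt]
    have hget : PySem.List.pyGet? full (a : Int) = some full[a] := by
      rw [PySem.List.pyGet?_natCast]; exact List.getElem?_eq_getElem hlt
    simp only [hnzdLoopA, hnzdGo, hget, Option.getD_some, hnzd_flag_fold, Bool.false_or,
      hnzd_contains_eq_any]
    have hrec : hnzdLoopA full (PySem.List.pyRange ((a : Int) + 1) full.length 1)
        = hnzdGo (full.drop (a + 1)) ((a : Int) + 1) := by
      have := ih (a + 1) (by omega)
      push_cast at this ⊢
      exact this
    rw [hrec]
    cases full[a].any (fun j => j.2 == (a : Int)) <;> simp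

-- ===== VERDICT (by name: the statement is the Claim_ definition above) =====
theorem has_not_zero_diag_spec : Claim_equal_has_not_zero_diag := by
  intro matrix _
  unfold Spec_has_not_zero_diag has_not_zero_diag has_not_zero_diag_alt
  have := hnzd_loop_eq_go matrix 0
  simpa using this
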